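-- pv_equiv track=rewrite | github.com/Gaotao22/CSCA08-48 | regex_functions.py | find_operator_index
-- ===== SOURCE A (Python) =====
-- def find_operator_index(target_str):
--     '''(str) -> int
--     The returns the position of the operator not within the bracket
--     REQ : This function only receives the regex without the outer bracket
--     >>> find_operator_index('(2.3*)|(0.e)')
--     6
--     >>> find_operator_index('2.(0|(0.e))')
--     1
--     '''
--     # start the level of bracket from 0
--     inner_bracket = 0
--     # initialize the operator_index as None for the convenience of the
--     # comparison in later functions
--     operator_index = None
--     # iterate the str
--     for index in range(len(target_str)):
--         # see whether it contains bracket inside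
--         if target_str[index] == '(':
--             inner_bracket += 1
--         if target_str[index] == ')':
--             inner_bracket -= 1
--         if inner_bracket == 0:
--             # find the index of the operator at the most outside level
--             if target_str[index] == '.' or target_str[index] == '|':
--                 operator_index = index
--     # return the index
--     return operator_index
-- ===== SOURCE B (Python) =====
-- def find_operator_index(target_str):
--     # Right-to-left scan with early exit: a position i is top-level iff the
--     # bracket delta of the suffix after i equals the whole string's delta,
--     # so the first top-level operator seen from the right is the answer.
--     total = target_str.count('(') - target_str.count(')')
--     depth_after = 0
--     for i in range(len(target_str) - 1, -1, -1):
--         c = target_str[i]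
--         if c in '.|' and depth_after == total:
--             return i
--         depth_after += (c == '(') - (c == ')')
--     return None
-- ===== Notes on version B (the rewrite author's own statement) =====
-- stated objective: alternative
-- what changed: Replaces A's full left-to-right scan that remembers the last top-level operator by a right-to-left scan with early exit: it computes the string's total bracket balance once, reconstructs each position's prefix depth from the suffix delta, and returns at the first top-level operator found from the right.
import Mathlib
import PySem

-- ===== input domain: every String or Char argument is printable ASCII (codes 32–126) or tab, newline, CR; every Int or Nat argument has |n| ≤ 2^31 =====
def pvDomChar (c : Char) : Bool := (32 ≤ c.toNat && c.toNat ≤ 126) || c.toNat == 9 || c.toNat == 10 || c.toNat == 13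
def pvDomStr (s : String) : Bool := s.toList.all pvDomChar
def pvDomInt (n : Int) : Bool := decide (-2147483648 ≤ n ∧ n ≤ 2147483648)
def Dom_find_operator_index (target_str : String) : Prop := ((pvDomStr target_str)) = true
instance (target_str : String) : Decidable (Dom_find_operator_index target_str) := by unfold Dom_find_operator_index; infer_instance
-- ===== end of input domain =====

-- B replaces A's left-to-right scan-and-remember loop by a right-to-left scan with
-- early exit, using the string's total bracket balance; return values proved equal.

-- ===== PORT A =====
-- A's single loop: structural recursion over the characters with the running index,
-- bracket level and last-seen operator index as state.
def aLoop (l : List Char) (idx : Nat) (inner_bracket : Int) (operator_index : Option Int) : Option Int :=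
  match l with
  | [] => operator_index
  | c :: rest =>
    let ib1 := if c = '(' then inner_bracket + 1 else inner_bracket
    let ib2 := if c = ')' then ib1 - 1 else ib1
    let oi := if ib2 = 0 ∧ (c = '.' ∨ c = '|') then some (idx : Int) else operator_index
    aLoop rest (idx + 1) ib2 oi

def find_operator_index (target_str : String) : Option Int :=
  aLoop target_str.toList 0 0 none

-- ===== PORT B =====
-- Source B's reverse loop: walk the characters right-to-left (ported as structural
-- recursion on the reversed list), returning at the first operator whose
-- suffix delta equals the total balance; `i - 1` mirrors the descending range.
def bLoop (l : List Char) (i : Nat) (total depth_after : Int) : Option Int :=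
  match l with
  | [] => none
  | c :: rest =>
    if (c = '.' ∨ c = '|') ∧ depth_after = total then some (i : Int)
    else bLoop rest (i - 1) total
      (depth_after + (if c = '(' then 1 else 0) - (if c = ')' then 1 else 0))

def find_operator_index_alt (target_str : String) : Option Int :=
  let l := target_str.toList
  let total : Int := (l.count '(' : Int) - (l.count ')' : Int)
  bLoop l.reverse (l.length - 1) total 0

-- ===== PRECONDITION & SPEC =====
def Spec_find_operator_index (target_str : String) (out : Option Int) : Prop := out = find_operator_index_alt target_str
instance (target_str : String) (out : Option Int) : Decidable (Spec_find_operator_index target_str out) := by unfold Spec_find_operator_index; infer_instance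

-- ===== CLAIM (what is proved, stated in full; the proofs are below) =====
def Claim_equal_find_operator_index : Prop := ∀ (target_str : String), Dom_find_operator_index target_str → Spec_find_operator_index target_str (find_operator_index target_str)

-- ===== LEMMAS AND PROOFS =====

-- A's loop over an appended list: state (index, depth, last operator) threads through.
theorem aLoop_append (l1 l2 : List Char) (i : Nat) (d : Int) (oi : Option Int) :
    aLoop (l1 ++ l2) i d oi =
      aLoop l2 (i + l1.length) (d + ((l1.count '(' : Int) - (l1.count ')' : Int))) (aLoop l1 i d oi) := by
  induction l1 generalizing i d oi with
  | nil => simp [aLoop]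
  | cons c rest ih =>
    simp only [List.cons_append, aLoop, ih, List.length_cons, List.count_cons]
    congr 1 <;> [skip; skip]
    · omega
    · split_ifs <;> push_cast <;> simp_all <;> omega

-- The core correspondence: running A's loop on l (prefix depth D before l) equals
-- running B's reverse loop on l.reverse, provided T = D + delta(l) + d0.
theorem aLoop_eq_bLoop (l : List Char) (i : Nat) (D T d0 : Int) (oi : Option Int)
    (h : T = D + ((l.count '(' : Int) - (l.count ')' : Int)) + d0) :
    aLoop l i D oi =
      match bLoop l.reverse (i + l.length - 1) T d0 with
      | some x => some x
      | none => oi := by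
  induction l using List.reverseRecOn generalizing d0 oi with
  | nil => simp [aLoop, bLoop]
  | append_singleton l' c ih =>
    have hcnt : ∀ ch : Char, (l' ++ [c]).count ch = l'.count ch + [c].count ch := by
      intro ch; simp [List.count_append]
    rw [aLoop_append]
    simp only [List.reverse_append, List.reverse_singleton, List.singleton_append,
      List.length_append, List.length_singleton]
    have hidx : i + (l'.length + 1) - 1 = i + l'.length := by omega
    rw [hidx]
    simp only [aLoop, bLoop]
    set dc : Int := (if c = '(' then 1 else 0) - (if c = ')' then 1 else 0) with hdc
    have hib : (if c = ')' then (if c = '(' then (D + ((l'.count '(' : Int) - (l'.count ')' : Int))) + 1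
          else (D + ((l'.count '(' : Int) - (l'.count ')' : Int)))) - 1
        else (if c = '(' then (D + ((l'.count '(' : Int) - (l'.count ')' : Int))) + 1
          else (D + ((l'.count '(' : Int) - (l'.count ')' : Int))))) =
        D + ((l'.count '(' : Int) - (l'.count ')' : Int)) + dc := by
      rw [hdc]; split_ifs <;> omega
    rw [hib]
    have hT : T = D + ((l'.count '(' : Int) - (l'.count ')' : Int)) + dc + d0 := by
      rw [h, hcnt '(', hcnt ')']
      have h1 : ([c].count '(' : Int) = if c = '(' then 1 else 0 := by
        split_ifs with hc <;> simp [hc]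
      have h2 : ([c].count ')' : Int) = if c = ')' then 1 else 0 := by
        split_ifs with hc <;> simp [hc]
      push_cast
      rw [hdc]
      split_ifs at * <;> omega
    by_cases hop : (c = '.' ∨ c = '|')
    · by_cases hd : d0 = T
      · have hz : D + ((l'.count '(' : Int) - (l'.count ')' : Int)) + dc = 0 := by omega
        simp [hz, hop, hd]
      · have hnz : ¬ (D + ((l'.count '(' : Int) - (l'.count ')' : Int)) + dc = 0) := by omega
        simp only [hnz, false_and, if_false, hop, hd, and_false, if_false]
        rw [show ((d0 + if c = '(' then (1:Int) else 0) - if c = ')' then 1 else 0) = d0 + dc from by rw [hdc]; ring]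
        exact ih (d0 + dc) oi (by omega)
    · simp only [hop, and_false, false_and, if_false]
      rw [show ((d0 + if c = '(' then (1:Int) else 0) - if c = ')' then 1 else 0) = d0 + dc from by rw [hdc]; ring]
      exact ih (d0 + dc) oi (by omega)

-- ===== VERDICT (by name: the statement is the Claim_ definition above) =====
theorem find_operator_index_spec : Claim_equal_find_operator_index := by
  intro s _
  unfold Spec_find_operator_index find_operator_index find_operator_index_alt
  rw [aLoop_eq_bLoop s.toList 0 0
        ((s.toList.count '(' : Int) - (s.toList.count ')' : Int)) 0 none (by omega)]
  simp only [Nat.zero_add]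
  rcases bLoop s.toList.reverse (s.toList.length - 1)
      ((s.toList.count '(' : Int) - (s.toList.count ')' : Int)) 0 with _ | x <;> rfl
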